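-- pv_equiv track=rewrite | github.com/pc5401/my_BOJ | 백준/Silver/17870. Problematic Public Keys/Problematic Public Keys.py | solve
-- ===== SOURCE A (Python) =====
-- def sieve(n: int) -> list[int]:
--     is_prime = [True] * (n + 1)
--     is_prime[0] = is_prime[1] = False
--     for i in range(2, int(n**0.5)+1):
--         if is_prime[i]:
--             for j in range(i*i, n+1, i):
--                 is_prime[j] = False
--     return [i for i, prime in enumerate(is_prime) if prime]
--
-- def factorize(num: int, primes: list[int]) -> tuple[int, int]:
--     for p in primes:
--         if p*p > num:
--             break
--         if num % p == 0:
--             return p, num // p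
--     return num, 1
--
-- def solve(M: int, keys: list[int]) -> list[int]:
--     primes_list = sieve(65536)
--     fact_set = set()
--     for key in keys:
--         f1, f2 = factorize(key, primes_list)
--         fact_set.add(f1)
--         fact_set.add(f2)
--     return sorted(fact_set)
-- ===== SOURCE B (Python) =====
-- def _factorize(num: int) -> tuple[int, int]:
--     d = 2
--     while d * d <= num:
--         if num % d == 0:
--             return d, num // d
--         d += 1
--     return num, 1
--
-- def solve(M: int, keys: list[int]) -> list[int]:
--     facts = set()
--     for key in keys:
--         f1, f2 = _factorize(key)
--         facts.add(f1)
--         facts.add(f2)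
--     return sorted(facts)
-- ===== Notes on version B (the rewrite author's own statement) =====
-- stated objective: simpler
-- what changed: B drops the 65537-entry Eratosthenes sieve precomputation entirely and factorizes each key by direct trial division over all integers d with d*d <= key, which finds the same smallest factor because the first divisor found is necessarily prime.
import Mathlib
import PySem

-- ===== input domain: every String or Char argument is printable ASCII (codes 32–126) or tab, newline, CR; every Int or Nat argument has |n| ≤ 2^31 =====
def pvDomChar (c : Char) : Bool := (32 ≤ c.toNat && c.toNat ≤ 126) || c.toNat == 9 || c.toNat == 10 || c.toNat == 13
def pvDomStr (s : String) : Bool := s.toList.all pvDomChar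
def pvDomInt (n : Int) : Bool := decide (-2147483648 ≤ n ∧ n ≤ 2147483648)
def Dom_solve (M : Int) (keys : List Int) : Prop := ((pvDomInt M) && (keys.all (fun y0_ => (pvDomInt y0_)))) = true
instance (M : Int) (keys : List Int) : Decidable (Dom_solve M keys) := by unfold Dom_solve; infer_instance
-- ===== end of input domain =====

-- B replaces A's precomputed prime sieve by direct trial division per key (simpler: no sieve helper).

-- ===== PORT A =====
-- body of the inner 'for i' loop of sieve (named helper so the proofs can cite it)
def sieveStep (m : Nat) (a : Array Bool) (i : Int) : Array Bool :=
  if a.getD i.toNat false then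
    (PySem.List.pyRange (i * i) ((m : Int) + 1) i).foldl (fun a j => a.setIfInBounds j.toNat false) a
  else a

def sieve (n : Int) : List Int :=
  let m := n.toNat
  -- is_prime = [True] * (n + 1); is_prime[0] = is_prime[1] = False  (Python list of bools = array)
  let a0 : Array Bool := ((Array.replicate (m + 1) true).setIfInBounds 0 false).setIfInBounds 1 false
  -- int(n**0.5) ported as Nat.sqrt: exact at the only call site n = 65536 (a perfect square, float sqrt exact)
  let a1 := (PySem.List.pyRange 2 ((Nat.sqrt m : Int) + 1) 1).foldl (sieveStep m) a0
  -- [i for i, prime in enumerate(is_prime) if prime]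
  -- (enumerate written via zipIdx, stack-safe at runtime; it IS PySem.List.enumerate by
  --  PySem.List.enumerate_eq_zipIdx_map, cited in the proofs)
  (((a1.toList.zipIdx.map (fun p => ((0 : Int) + (p.2 : Int), p.1))).filter
      (fun ip => ip.2)).map (fun ip => ip.1))

def factorize (num : Int) (primes : List Int) : Int × Int :=
  match primes with
  | [] => (num, 1)
  | p :: ps =>
    if p * p > num then (num, 1)
    else if PySem.Int.mod num p = 0 then (p, PySem.Int.floordiv num p)
    else factorize num ps

def solve (M : Int) (keys : List Int) : List Int :=
  let primes_list := sieve 65536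
  let fact_set : PySem.Set Int :=
    keys.foldl (fun s key =>
      let f := factorize key primes_list
      PySem.Set.add (PySem.Set.add s f.1) f.2) PySem.Set.empty
  PySem.List.sorted fact_set (fun x => x) false

-- ===== PORT B =====
-- while d*d <= num: if num % d == 0: return d, num//d; d += 1  /  return num, 1
def trialFact (num : Int) (d : Int) : Int × Int :=
  if h : d * d ≤ num then
    if PySem.Int.mod num d = 0 then (d, PySem.Int.floordiv num d)
    else trialFact num (d + 1)
  else (num, 1)
termination_by (num + 1 - d).toNat
decreasing_by
  have hd : d ≤ num := by
    by_cases h0 : d ≤ 0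
    · have := mul_self_nonneg d; omega
    · nlinarith
  omega

def solve_alt (M : Int) (keys : List Int) : List Int :=
  let facts : PySem.Set Int :=
    keys.foldl (fun s key =>
      let f := trialFact key 2
      PySem.Set.add (PySem.Set.add s f.1) f.2) PySem.Set.empty
  PySem.List.sorted facts (fun x => x) false

-- ===== PRECONDITION & SPEC =====
def Spec_solve (M : Int) (keys : List Int) (out : List Int) : Prop := out = solve_alt M keys
instance (M : Int) (keys : List Int) (out : List Int) : Decidable (Spec_solve M keys out) := by unfold Spec_solve; infer_instance

-- ===== CLAIM (what is proved, stated in full; the proofs are below) =====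
def Claim_equal_solve : Prop := ∀ (M : Int) (keys : List Int), Dom_solve M keys → Spec_solve M keys (solve M keys)

-- ===== LEMMAS AND PROOFS =====

-- the list the sieve returns: all primes up to 65536, ascending
def fullPrimes : List Nat := (List.range 65537).filter (fun k => decide (Nat.Prime k))

-- invariant of the outer sieve loop: entry k still true after processing i < t
def alive (t k : Nat) : Prop := 2 ≤ k ∧ ∀ q, q < t → Nat.Prime q → ¬(q ∣ k ∧ q * q ≤ k)

-- common value of both factorizations for num ≥ 4
def specF (num : Int) : Int × Int :=
  if num.toNat.Prime then (num, 1)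
  else ((num.toNat.minFac : Int), ((num.toNat / num.toNat.minFac : Nat) : Int))

theorem size_foldl_set (js : List Int) (a : Array Bool) :
    (js.foldl (fun a j => a.setIfInBounds j.toNat false) a).size = a.size := by
  induction js generalizing a with
  | nil => rfl
  | cons j t ih => simpa [Array.size_setIfInBounds] using ih (a.setIfInBounds j.toNat false)

theorem getD_foldl_set (js : List Int) (a : Array Bool) (k : Nat) (hk : k < a.size) :
    ((js.foldl (fun a j => a.setIfInBounds j.toNat false) a).getD k false = true) ↔
      (a.getD k false = true ∧ ∀ j ∈ js, j.toNat ≠ k) := by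
  induction js generalizing a with
  | nil => simp
  | cons j t ih =>
    have hset : (a.setIfInBounds j.toNat false).getD k false
        = if j.toNat = k then false else a.getD k false := by
      rw [Array.getD_eq_getD_getElem?, Array.getElem?_setIfInBounds]
      by_cases hjk : j.toNat = k
      · simp [hjk, hk]
      · simp [hjk, Array.getD_eq_getD_getElem?]
    rw [List.foldl_cons, ih _ (by simpa [Array.size_setIfInBounds] using hk), hset]
    by_cases hjk : j.toNat = k <;> simp [hjk]

theorem inner_step (i : Nat) (hi2 : 2 ≤ i) (a : Array Bool) (ha : a.size = 65537)
    (k : Nat) (hk : k ≤ 65536) :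
    (((PySem.List.pyRange ((i : Int) * (i : Int)) ((65536 : Int) + 1) (i : Int)).foldl
        (fun a j => a.setIfInBounds j.toNat false) a).getD k false = true)
      ↔ (a.getD k false = true ∧ ¬(i ∣ k ∧ i * i ≤ k)) := by
  rw [getD_foldl_set _ _ _ (by omega)]
  have hmem : ∀ j : Int, j ∈ PySem.List.pyRange ((i : Int) * (i : Int)) ((65536 : Int) + 1) (i : Int)
      ↔ ((i : Int) * (i : Int) ≤ j ∧ j < 65537 ∧ (i : Int) ∣ j) := by
    intro j
    rw [PySem.List.mem_pyRange_iff_of_pos (by exact_mod_cast Nat.lt_of_lt_of_le (by norm_num) hi2)]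
    constructor
    · rintro ⟨h1, h2, h3⟩
      refine ⟨h1, by omega, ?_⟩
      have hsq : (i : Int) ∣ (i : Int) * (i : Int) := Dvd.intro _ rfl
      have := dvd_add h3 hsq
      simpa using this
    · rintro ⟨h1, h2, h3⟩
      refine ⟨h1, by omega, ?_⟩
      exact dvd_sub h3 (Dvd.intro _ rfl)
  constructor
  · rintro ⟨h1, h2⟩
    refine ⟨h1, ?_⟩
    rintro ⟨hdvd, hle⟩
    have hmemk : (k : Int) ∈ PySem.List.pyRange ((i : Int) * (i : Int)) ((65536 : Int) + 1) (i : Int) := by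
      rw [hmem]
      refine ⟨by exact_mod_cast hle, by omega, by exact_mod_cast hdvd⟩
    exact h2 _ hmemk (by simp)
  · rintro ⟨h1, h2⟩
    refine ⟨h1, fun j hj hjk => ?_⟩
    rw [hmem] at hj
    obtain ⟨hj1, hj2, hj3⟩ := hj
    have hj0 : 0 ≤ j := le_trans (by positivity) hj1
    have hjeq : j = (k : Int) := by omega
    subst hjeq
    apply h2
    constructor
    · exact_mod_cast hj3
    · exact_mod_cast hj1

theorem alive_succ (t k : Nat) :
    alive (t + 1) k ↔ (alive t k ∧ (Nat.Prime t → ¬(t ∣ k ∧ t * t ≤ k))) := by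
  unfold alive
  constructor
  · rintro ⟨h2, h⟩
    exact ⟨⟨h2, fun q hq hp => h q (by omega) hp⟩, fun hp => h t (by omega) hp⟩
  · rintro ⟨⟨h2, h⟩, ht⟩
    refine ⟨h2, fun q hq hp => ?_⟩
    rcases Nat.lt_or_ge q t with h' | h'
    · exact h q h' hp
    · have : q = t := by omega
      subst this; exact ht hp

theorem alive_final (k : Nat) (hk : k ≤ 65536) : alive 257 k ↔ Nat.Prime k := by
  unfold alive
  constructor
  · rintro ⟨h2, h⟩
    by_contra hnp
    have hq := Nat.minFac_prime (by omega : k ≠ 1)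
    have hdvd := Nat.minFac_dvd k
    have hsq : k.minFac ^ 2 ≤ k := Nat.minFac_sq_le_self (by omega) hnp
    rw [pow_two] at hsq
    have hlt : k.minFac < 257 := by
      by_contra hge
      have : 257 * 257 ≤ k.minFac * k.minFac :=
        Nat.mul_le_mul (by omega) (by omega)
      omega
    exact h k.minFac hlt hq ⟨hdvd, hsq⟩
  · intro hp
    refine ⟨hp.two_le, fun q hq hqp ⟨hdvd, hsq⟩ => ?_⟩
    rcases (Nat.Prime.eq_one_or_self_of_dvd hp q hdvd) with h1 | h1
    · exact Nat.Prime.one_lt hqp |>.ne' h1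
    · subst h1
      have := hp.two_le
      nlinarith

theorem outer_fold (t : Nat) (h2 : 2 ≤ t) (h257 : t ≤ 257) (a : Array Bool)
    (ha : a.size = 65537)
    (inv : ∀ k, k ≤ 65536 → (a.getD k false = true ↔ alive t k)) :
    ∀ k, k ≤ 65536 →
      (((PySem.List.pyRange (t : Int) 257 1).foldl (sieveStep 65536) a).getD k false = true
        ↔ alive 257 k) := by
  by_cases ht : 257 ≤ t
  · have h257' : t = 257 := by omega
    subst h257'
    rw [PySem.List.pyRange_one_eq_nil (by norm_num)]
    simpa using inv
  · have ht' : (t : Int) < 257 := by exact_mod_cast by omega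
    rw [PySem.List.pyRange_one_cons ht', List.foldl_cons]
    have hstep : sieveStep 65536 a (t : Int)
        = if a.getD t false then
            (PySem.List.pyRange ((t : Int) * (t : Int)) ((65536 : Int) + 1) (t : Int)).foldl
              (fun a j => a.setIfInBounds j.toNat false) a
          else a := by
      unfold sieveStep
      rw [Int.toNat_natCast]
      norm_num
    by_cases hpr : Nat.Prime t
    · have hat : a.getD t false = true := by
        rw [inv t (by omega)]
        refine ⟨hpr.two_le, fun q hq hqp ⟨hdvd, hsq⟩ => ?_⟩
        rcases (Nat.Prime.eq_one_or_self_of_dvd hpr q hdvd) with h1 | h1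
        · exact Nat.Prime.one_lt hqp |>.ne' h1
        · omega
      rw [hstep, if_pos hat]
      have hrec := outer_fold (t + 1) (by omega) (by omega)
        ((PySem.List.pyRange ((t : Int) * (t : Int)) ((65536 : Int) + 1) (t : Int)).foldl
          (fun a j => a.setIfInBounds j.toNat false) a)
        (by rw [size_foldl_set]; exact ha)
        (fun k hk => by
          rw [inner_step t hpr.two_le a ha k hk, alive_succ, inv k hk]
          exact ⟨fun h => ⟨h.1, fun _ => h.2⟩, fun h => ⟨h.1, h.2 hpr⟩⟩)
      intro k hk
      have hcast : ((t : Int) + 1) = (((t + 1 : Nat)) : Int) := by push_cast; ring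
      rw [hcast]
      exact hrec k hk
    · have hat : a.getD t false = false := by
        have := inv t (by omega)
        rcases Bool.eq_false_or_eq_true (a.getD t false) with hb | hb
        · exfalso
          have hal : alive t t := (inv t (by omega)).mp hb
          obtain ⟨h2t, hno⟩ := hal
          have hq := Nat.minFac_prime (by omega : t ≠ 1)
          have hdvd := Nat.minFac_dvd t
          have hsq : t.minFac ^ 2 ≤ t := Nat.minFac_sq_le_self (by omega) hpr
          rw [pow_two] at hsq
          have hlt : t.minFac < t := by
            have hle := Nat.le_of_dvd (by omega) hdvd
            rcases Nat.lt_or_ge t.minFac t with h | h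
            · exact h
            · exfalso
              have : t.minFac = t := by omega
              exact hpr (this ▸ hq)
          exact hno t.minFac hlt hq ⟨hdvd, hsq⟩
        · exact hb
      rw [hstep, if_neg (by simp [hat])]
      exact outer_fold (t + 1) (by omega) (by omega) a ha
        (fun k hk => by
          rw [inv k hk, alive_succ]
          exact ⟨fun h => ⟨h, fun hp => absurd hp hpr⟩, fun h => h.1⟩)
termination_by 257 - t

theorem size_foldl_sieveStep (l : List Int) (a : Array Bool) :
    (l.foldl (sieveStep 65536) a).size = a.size := by
  induction l generalizing a with
  | nil => rfl
  | cons i t ih =>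
    rw [List.foldl_cons, ih]
    unfold sieveStep
    split
    · rw [size_foldl_set]
    · rfl

theorem pick_fst_filter_snd (xs : List Int) (g : Int → Bool) :
    (((xs.map (fun j => (j, g j))).filter (fun ip => ip.2)).map (fun ip => ip.1)) = xs.filter g := by
  induction xs with
  | nil => rfl
  | cons x t ih =>
    simp only [List.map_cons, List.filter_cons]
    by_cases hx : g x
    · simp only [hx, if_pos, List.map_cons, ih]
    · simp only [hx]
      simpa using ih

theorem filter_pyRange_eq (n : Nat) (g : Int → Bool) (f : Nat → Bool)
    (h : ∀ k, k < n → g ((k : Nat) : Int) = f k) :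
    ((PySem.List.pyRange 0 ((n : Nat) : Int) 1).filter g) = ((List.range n).filter f).map Int.ofNat := by
  induction n with
  | zero =>
    rw [PySem.List.pyRange_one_eq_nil (by norm_num)]
    rfl
  | succ m ih =>
    have hc : (((m + 1 : Nat)) : Int) = ((m : Nat) : Int) + 1 := by push_cast; ring
    rw [hc, PySem.List.pyRange_one_succ_right (by positivity), List.range_succ]
    rw [List.filter_append, List.filter_append, List.map_append]
    rw [ih (fun k hk => h k (by omega))]
    congr 1
    have hm := h m (by omega)
    simp only [List.filter_cons, List.filter_nil]
    rw [hm]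
    by_cases hf : f m
    · simp [hf]
    · simp [hf]

set_option maxRecDepth 4000 in
theorem sieve_eq : sieve 65536 = fullPrimes.map Int.ofNat := by
  simp only [sieve]
  have htn : Int.toNat 65536 = 65536 := rfl
  rw [htn]
  have hsqrt : Nat.sqrt 65536 = 256 := by
    have h : (65536 : Nat) = 256 ^ 2 := by norm_num
    rw [h, Nat.sqrt_eq']
  rw [hsqrt]
  set a0 : Array Bool :=
    ((Array.replicate (65536 + 1) true).setIfInBounds 0 false).setIfInBounds 1 false with ha0def
  have ha0size : a0.size = 65537 := by
    simp [ha0def, Array.size_setIfInBounds, Array.size_replicate]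
  have ha0 : ∀ k, k ≤ 65536 → (a0.getD k false = true ↔ alive 2 k) := by
    intro k hk
    have halive2 : alive 2 k ↔ 2 ≤ k :=
      ⟨fun h => h.1, fun h => ⟨h, fun q hq hqp => by have := hqp.two_le; omega⟩⟩
    rw [halive2, ha0def, Array.getD_eq_getD_getElem?]
    simp only [Array.getElem?_setIfInBounds, Array.size_setIfInBounds, Array.size_replicate,
      Array.getElem?_replicate]
    rcases Nat.lt_or_ge k 2 with h2 | h2
    · interval_cases k <;> simp
    · have h0 : ¬ (0 = k) := by omega
      have h1 : ¬ (1 = k) := by omega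
      simp [h0, h1, Nat.lt_succ_of_le hk, h2]
  set a1 := (PySem.List.pyRange 2 (((256 : Nat) : Int) + 1) 1).foldl (sieveStep 65536) a0 with ha1def
  have hrange : (((256 : Nat) : Int) + 1) = (257 : Int) := by norm_num
  have hget : ∀ k, k ≤ 65536 → (a1.getD k false = true ↔ Nat.Prime k) := by
    intro k hk
    rw [ha1def, hrange]
    have h2 : ((2 : Nat) : Int) = (2 : Int) := by norm_num
    rw [← h2]
    rw [outer_fold 2 (by omega) (by omega) a0 ha0size ha0 k hk]
    exact alive_final k hk
  have hsize1 : a1.size = 65537 := by rw [ha1def, size_foldl_sieveStep, ha0size]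
  clear_value a1
  clear_value a0
  rw [← PySem.List.enumerate_eq_zipIdx_map a1.toList 0]
  rw [PySem.List.enumerate_eq_map_pyRange a1.toList false]
  have hlen : PySem.List.len a1.toList = 65537 := by
    simp [PySem.List.len_eq, hsize1]
  rw [hlen]
  rw [pick_fst_filter_snd]
  have h65537c : (65537 : Int) = (((65537 : Nat)) : Int) := by norm_num
  rw [h65537c]
  rw [filter_pyRange_eq 65537 _ (fun k : Nat => decide (Nat.Prime k)) ?_]
  · unfold fullPrimes
    rfl
  · intro k hk
    have hk' : k ≤ 65536 := by omega
    have hiff := hget k hk'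
    have hgd : PySem.List.pyGetD a1.toList ((k : Nat) : Int) false = a1.getD k false := by
      rw [PySem.List.pyGetD_natCast, Array.getD_eq_getD_getElem?]
      rw [List.getD_eq_getElem?_getD, Array.getElem?_toList]
    rw [hgd]
    rcases Bool.eq_false_or_eq_true (a1.getD k false) with hb | hb
    · rw [hb, eq_comm, decide_eq_true_eq]
      exact hiff.mp hb
    · rw [hb, eq_comm, decide_eq_false_iff_not]
      intro hpk
      rw [hiff.mpr hpk] at hb
      exact Bool.true_eq_false.mp hb

theorem trial_eq_spec (num : Int) (d : Nat) (h4 : 4 ≤ num) (hd2 : 2 ≤ d)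
    (hdm : d ≤ num.toNat.minFac) : trialFact num (d : Int) = specF num := by
  have hN : ((num.toNat : Nat) : Int) = num := Int.toNat_of_nonneg (by omega)
  have hN4 : 4 ≤ num.toNat := by omega
  have hmfle : num.toNat.minFac ≤ num.toNat := Nat.minFac_le (by omega)
  rw [trialFact]
  by_cases hlt : (d : Int) * (d : Int) ≤ num
  · rw [dif_pos hlt]
    have hddN : d * d ≤ num.toNat := by
      have : ((d * d : Nat) : Int) ≤ ((num.toNat : Nat) : Int) := by push_cast; rw [hN]; exact_mod_cast hlt
      exact_mod_cast this
    by_cases hdvd : PySem.Int.mod num (d : Int) = 0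
    · rw [if_pos hdvd]
      have hdvdN : d ∣ num.toNat := by
        have h1 : ((d : Nat) : Int) ∣ num := (PySem.Int.mod_eq_zero_iff_dvd num (d : Int)).mp hdvd
        rw [← hN] at h1
        exact_mod_cast h1
      have hdm' : num.toNat.minFac ≤ d := Nat.minFac_le_of_dvd hd2 hdvdN
      have hdeq : d = num.toNat.minFac := by omega
      have hdn : d < num.toNat := by
        have : 2 * d ≤ d * d := Nat.mul_le_mul_right d hd2
        omega
      have hnp : ¬ num.toNat.Prime := by
        intro hp
        rcases (Nat.Prime.eq_one_or_self_of_dvd hp d hdvdN) with h1 | h1 <;> omega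
      unfold specF
      rw [if_neg hnp]
      have hfd : PySem.Int.floordiv num (d : Int) = ((num.toNat / d : Nat) : Int) := by
        rw [← hN]
        exact PySem.Int.floordiv_natCast num.toNat d
      rw [hfd, hdeq]
    · rw [if_neg hdvd]
      have hdnd : ¬ d ∣ num.toNat := by
        intro hc
        apply hdvd
        rw [PySem.Int.mod_eq_zero_iff_dvd, ← hN]
        exact_mod_cast hc
      have hne : d ≠ num.toNat.minFac := by
        intro hc
        exact hdnd (hc ▸ Nat.minFac_dvd num.toNat)
      have hrec := trial_eq_spec num (d + 1) h4 (by omega) (by omega)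
      have hcast : ((d : Nat) : Int) + 1 = (((d + 1 : Nat)) : Int) := by push_cast; ring
      rw [hcast]
      exact hrec
  · rw [dif_neg hlt]
    have hNlt : num.toNat < d * d := by
      by_contra hc
      apply hlt
      have : ((d * d : Nat) : Int) ≤ ((num.toNat : Nat) : Int) := by exact_mod_cast by omega
      rw [hN] at this
      exact_mod_cast this
    have hp : num.toNat.Prime := by
      by_contra hnp
      have hsq : num.toNat.minFac ^ 2 ≤ num.toNat := Nat.minFac_sq_le_self (by omega) hnp
      rw [pow_two] at hsq
      have : d * d ≤ num.toNat.minFac * num.toNat.minFac := Nat.mul_le_mul hdm hdm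
      omega
    unfold specF
    rw [if_pos hp]
termination_by num.toNat + 1 - d

theorem fact_eq_spec (ps : List Nat) (num : Int) (h4 : 4 ≤ num)
    (hp : ∀ q ∈ ps, Nat.Prime q) (hpw : ps.Pairwise (· < ·))
    (hmf : ¬ num.toNat.Prime → num.toNat.minFac ∈ ps) :
    factorize num (ps.map Int.ofNat) = specF num := by
  have hN : ((num.toNat : Nat) : Int) = num := Int.toNat_of_nonneg (by omega)
  induction ps with
  | nil =>
    have hp' : num.toNat.Prime := by
      by_contra hnp
      simpa using hmf hnp
    simp only [List.map_nil, factorize, specF, if_pos hp']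
  | cons p t ih =>
    have hpp : Nat.Prime p := hp p (List.mem_cons_self)
    have hp2 : 2 ≤ p := hpp.two_le
    simp only [List.map_cons, factorize]
    have hofNat : (Int.ofNat p) = ((p : Nat) : Int) := rfl
    rw [hofNat]
    by_cases h1 : ((p : Nat) : Int) * ((p : Nat) : Int) > num
    · rw [if_pos h1]
      have hNlt : num.toNat < p * p := by
        by_contra hc
        have : ((p * p : Nat) : Int) ≤ ((num.toNat : Nat) : Int) := by exact_mod_cast by omega
        rw [hN] at this
        push_cast at this
        omega
      have hp' : num.toNat.Prime := by
        by_contra hnp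
        have hmem := hmf hnp
        have hsq : num.toNat.minFac ^ 2 ≤ num.toNat := Nat.minFac_sq_le_self (by omega) hnp
        rw [pow_two] at hsq
        rcases List.mem_cons.mp hmem with hc | hc
        · rw [hc] at hsq
          omega
        · have hplt : p < num.toNat.minFac := (List.pairwise_cons.mp hpw).1 _ hc
          have : p * p < num.toNat.minFac * num.toNat.minFac :=
            Nat.mul_lt_mul_of_lt_of_le hplt (by omega) (by omega)
          omega
      unfold specF
      rw [if_pos hp']
    · rw [if_neg h1]
      rw [not_lt] at h1
      have hppN : p * p ≤ num.toNat := by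
        have : ((p * p : Nat) : Int) ≤ num := by push_cast; exact_mod_cast h1
        rw [← hN] at this
        exact_mod_cast this
      by_cases h2 : PySem.Int.mod num ((p : Nat) : Int) = 0
      · rw [if_pos h2]
        have hdvdN : p ∣ num.toNat := by
          have hd : ((p : Nat) : Int) ∣ num := (PySem.Int.mod_eq_zero_iff_dvd _ _).mp h2
          rw [← hN] at hd
          exact_mod_cast hd
        have hpn : p < num.toNat := by
          have : 2 * p ≤ p * p := Nat.mul_le_mul_right p hp2
          omega
        have hnp : ¬ num.toNat.Prime := by
          intro hpr
          rcases (Nat.Prime.eq_one_or_self_of_dvd hpr p hdvdN) with hh | hh <;> omega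
        have hmem := hmf hnp
        have hle : num.toNat.minFac ≤ p := Nat.minFac_le_of_dvd hp2 hdvdN
        have hpeq : num.toNat.minFac = p := by
          rcases List.mem_cons.mp hmem with hc | hc
          · exact hc
          · have := (List.pairwise_cons.mp hpw).1 _ hc
            omega
        unfold specF
        rw [if_neg hnp, hpeq]
        have hfd : PySem.Int.floordiv num ((p : Nat) : Int) = ((num.toNat / p : Nat) : Int) := by
          rw [← hN]
          exact PySem.Int.floordiv_natCast num.toNat p
        rw [hfd]
      · rw [if_neg h2]
        apply ih (fun q hq => hp q (List.mem_cons_of_mem _ hq)) (List.pairwise_cons.mp hpw).2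
        intro hnp
        have hmem := hmf hnp
        have hne : num.toNat.minFac ≠ p := by
          intro hc
          apply h2
          rw [PySem.Int.mod_eq_zero_iff_dvd, ← hN]
          exact_mod_cast (hc ▸ Nat.minFac_dvd num.toNat)
        rcases List.mem_cons.mp hmem with hc | hc
        · exact absurd hc hne
        · exact hc

theorem fact_eq (num : Int) (hub : num ≤ 2147483648) :
    factorize num (fullPrimes.map Int.ofNat) = trialFact num 2 := by
  by_cases h4 : num < 4
  · -- both scans stop immediately: every candidate p satisfies p * p ≥ 4 > num
    have htf : trialFact num 2 = (num, 1) := by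
      rw [trialFact, dif_neg (by omega)]
    rw [htf]
    cases hfp : fullPrimes with
    | nil => simp [factorize]
    | cons p t =>
      have hpp : Nat.Prime p := by
        have : p ∈ fullPrimes := by rw [hfp]; exact List.mem_cons_self
        unfold fullPrimes at this
        have := List.of_mem_filter this
        exact of_decide_eq_true this
      have hp2 : 2 ≤ p := hpp.two_le
      simp only [List.map_cons, factorize]
      rw [if_pos ?_]
      have h1 : (4 : Int) ≤ ((p : Nat) : Int) * ((p : Nat) : Int) := by
        have : 4 ≤ p * p := Nat.mul_le_mul hp2 hp2
        exact_mod_cast this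
      have hofNat : (Int.ofNat p) = ((p : Nat) : Int) := rfl
      rw [hofNat]
      omega
  · rw [not_lt] at h4
    have hnum1 : num.toNat ≠ 1 := by omega
    have hmf2 : 2 ≤ num.toNat.minFac := (Nat.minFac_prime hnum1).two_le
    have htrial : trialFact num 2 = specF num := by
      have h := trial_eq_spec num 2 h4 (by omega) hmf2
      have hc : ((2 : Nat) : Int) = (2 : Int) := by norm_num
      rw [← hc]
      exact h
    have hfact : factorize num (fullPrimes.map Int.ofNat) = specF num := by
      apply fact_eq_spec fullPrimes num h4
      · intro q hq
        unfold fullPrimes at hq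
        exact of_decide_eq_true (List.mem_filter.mp hq).2
      · unfold fullPrimes
        exact List.Pairwise.sublist List.filter_sublist List.pairwise_lt_range
      · intro hnp
        have hsq : num.toNat.minFac ^ 2 ≤ num.toNat := Nat.minFac_sq_le_self (by omega) hnp
        rw [pow_two] at hsq
        have hub' : num.toNat ≤ 2147483648 := by omega
        have hlt : num.toNat.minFac < 65537 := by
          by_contra hge
          have : 65537 * 65537 ≤ num.toNat.minFac * num.toNat.minFac :=
            Nat.mul_le_mul (by omega) (by omega)
          omega
        unfold fullPrimes
        apply List.mem_filter_of_mem
        · exact List.mem_range.mpr hlt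
        · exact decide_eq_true (Nat.minFac_prime hnum1)
    rw [hfact, htrial]

-- ===== VERDICT (by name: the statement is the Claim_ definition above) =====
theorem solve_spec : Claim_equal_solve := by
  intro M keys hdom
  unfold Spec_solve
  simp only [solve, solve_alt, sieve_eq]
  have hb : ∀ k ∈ keys, k ≤ 2147483648 := by
    unfold Dom_solve at hdom
    simp only [Bool.and_eq_true, List.all_eq_true, pvDomInt, decide_eq_true_eq] at hdom
    exact fun k hk => (hdom.2 k hk).2
  have : keys.foldl (fun s key =>
      let f := factorize key (fullPrimes.map Int.ofNat)
      PySem.Set.add (PySem.Set.add s f.1) f.2) PySem.Set.empty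
      = keys.foldl (fun s key =>
      let f := trialFact key 2
      PySem.Set.add (PySem.Set.add s f.1) f.2) PySem.Set.empty := by
    apply PySem.List.foldl_congr_mem
    intro acc x hx
    simp only [fact_eq x (hb x hx)]
  simp only [this]
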